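-- pv_equiv track=rewrite | github.com/adaydar/MedCARF | RRG/chest/utils/correction_report_labels.py | generate_report_batch
-- ===== SOURCE A (Python) =====
-- LABELS = [
--     "No Finding",
--     "Enlarged Cardiomediastinum",
--     "Cardiomegaly",
--     "Lung Opacity",
--     "Lung Lesion",
--     "Edema",
--     "Consolidation",
--     "Pneumonia",
--     "Atelectasis",
--     "Pneumothorax",
--     "Pleural Effusion",
--     "Pleural Other",
--     "Fracture",
--     "Support Devices"
-- ]
--
-- def most_frequent_phrase(label, phrase_dict, phrase_freq):
--     phrases = phrase_dict.get(label, [])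
--     if not phrases:
--         return None
--
--     freq = phrase_freq.get(label, {})
--
--     if not freq:
--         return phrases[0]   # fallback
--
--     # Choose most frequent among available phrases
--     return max(freq, key=freq.get)
--
-- def generate_report_batch(pred_labels_batch, phrase_dict, phrase_freq):
--
--     reports = []
--
--     for pred_labels in pred_labels_batch:
--         sentences = []
--
--         for i, val in enumerate(pred_labels):
--             if val == 1:
--                 label_name = LABELS[i]
--
--                 chosen = most_frequent_phrase(label_name, phrase_dict, phrase_freq)
--
--                 if chosen:
--                     sentences.append(chosen)
--                 else:
--                     sentences.append(f"{label_name} present.")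
--
--         if not sentences:
--             reports.append("No significant abnormalities detected.")
--         else:
--             reports.append(" ".join(sentences))
--
--     return reports
-- ===== SOURCE B (Python) =====
-- LABELS = [
--     "No Finding",
--     "Enlarged Cardiomediastinum",
--     "Cardiomegaly",
--     "Lung Opacity",
--     "Lung Lesion",
--     "Edema",
--     "Consolidation",
--     "Pneumonia",
--     "Atelectasis",
--     "Pneumothorax",
--     "Pleural Effusion",
--     "Pleural Other",
--     "Fracture",
--     "Support Devices"
-- ]
--
-- def _label_sentence(label, phrase_dict, phrase_freq):
--     phrases = phrase_dict.get(label, [])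
--     if not phrases:
--         return f"{label} present."
--     freq = phrase_freq.get(label, {})
--     if freq:
--         best = None
--         for p, c in freq.items():
--             if best is None or c > best[1]:
--                 best = (p, c)
--         chosen = best[0]
--     else:
--         chosen = phrases[0]
--     return chosen if chosen else f"{label} present."
--
-- def generate_report_batch(pred_labels_batch, phrase_dict, phrase_freq):
--     table = [_label_sentence(l, phrase_dict, phrase_freq) for l in LABELS]
--     reports = []
--     for pred_labels in pred_labels_batch:
--         sentences = [table[i] for i, v in enumerate(pred_labels) if v == 1]
--         reports.append(" ".join(sentences) if sentences else "No significant abnormalities detected.")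
--     return reports
-- ===== Notes on version B (the rewrite author's own statement) =====
-- stated objective: faster
-- what changed: B precomputes one sentence per label (running arg-max loop over each label's frequency dict) into a 14-entry table once, then builds each report by plain table lookups, instead of A recomputing the most-frequent phrase for every set label of every batch item.
import Mathlib
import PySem

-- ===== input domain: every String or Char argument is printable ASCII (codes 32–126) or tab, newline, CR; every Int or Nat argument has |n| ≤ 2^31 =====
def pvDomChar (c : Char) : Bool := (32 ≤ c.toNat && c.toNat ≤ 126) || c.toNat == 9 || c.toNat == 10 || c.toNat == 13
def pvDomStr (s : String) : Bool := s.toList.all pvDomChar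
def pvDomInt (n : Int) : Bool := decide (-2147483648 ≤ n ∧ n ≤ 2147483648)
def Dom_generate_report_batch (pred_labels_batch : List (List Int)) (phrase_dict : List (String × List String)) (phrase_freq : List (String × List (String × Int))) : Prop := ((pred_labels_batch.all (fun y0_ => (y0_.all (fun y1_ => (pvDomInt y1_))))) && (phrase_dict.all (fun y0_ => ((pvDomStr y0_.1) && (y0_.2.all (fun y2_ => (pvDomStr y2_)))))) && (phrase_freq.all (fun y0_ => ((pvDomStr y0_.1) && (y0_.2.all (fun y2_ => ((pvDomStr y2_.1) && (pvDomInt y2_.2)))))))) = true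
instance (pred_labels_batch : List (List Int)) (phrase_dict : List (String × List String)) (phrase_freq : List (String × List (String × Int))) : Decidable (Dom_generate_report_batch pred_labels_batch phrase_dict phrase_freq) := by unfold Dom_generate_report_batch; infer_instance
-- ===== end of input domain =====

-- B precomputes the per-label sentence table once and then builds each report by table lookups,
-- instead of A's recomputation of the most-frequent phrase for every set label of every batch item.

-- ===== PORT A =====
def pyLABELS : List String := [
  "No Finding", "Enlarged Cardiomediastinum", "Cardiomegaly", "Lung Opacity",
  "Lung Lesion", "Edema", "Consolidation", "Pneumonia", "Atelectasis",
  "Pneumothorax", "Pleural Effusion", "Pleural Other", "Fracture", "Support Devices"]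

-- most_frequent_phrase(label, phrase_dict, phrase_freq); 'max(freq, key=freq.get)' is
-- PySem.List.max? over the dict's keys keyed by lookup (freq.get k = getD k 0 since k is a key).
def pvMostFrequentPhrase (label : String) (pd : PySem.Dict String (List String))
    (pf : PySem.Dict String (PySem.Dict String Int)) : Option String :=
  let phrases := pd.getD label []
  if phrases = [] then none
  else
    let freq := pf.getD label PySem.Dict.empty
    if freq.items = [] then some (phrases.getD 0 "")  -- phrases[0]; in range since phrases ≠ []
    else PySem.List.max? freq.keys (fun k => freq.getD k 0)

-- the body of A's inner loop: chosen if chosen (truthy: not None, not "") else f"{label_name} present."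
def pvSentA (label : String) (pd : PySem.Dict String (List String))
    (pf : PySem.Dict String (PySem.Dict String Int)) : String :=
  match pvMostFrequentPhrase label pd pf with
  | some c => if c = "" then label ++ " present." else c
  | none => label ++ " present."

def generate_report_batch (pred_labels_batch : List (List Int)) (phrase_dict : List (String × List String)) (phrase_freq : List (String × List (String × Int))) : List String :=
  let pd := PySem.Dict.ofList phrase_dict
  let pf := PySem.Dict.ofList (phrase_freq.map (fun p => (p.1, PySem.Dict.ofList p.2)))
  pred_labels_batch.foldl (fun reports pred_labels =>
    let sentences := (PySem.List.enumerate pred_labels 0).foldl (fun sents iv =>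
      if iv.2 = 1 then
        sents ++ [pvSentA (PySem.List.pyGetD pyLABELS iv.1 "") pd pf]  -- LABELS[i]; in range under Pre_
      else sents) []
    if sentences = [] then reports ++ ["No significant abnormalities detected."]
    else reports ++ [PySem.Str.join " " sentences]) []

-- ===== PORT B =====
-- B's running arg-max loop over freq.items(): keep the first pair with maximal count.
def pvBBest (l : List (String × Int)) : Option (String × Int) :=
  l.foldl (fun best pc =>
    match best with
    | none => some pc
    | some b => if b.2 < pc.2 then some pc else some b) none

-- _label_sentence(label, phrase_dict, phrase_freq)
def pvBSent (label : String) (pd : PySem.Dict String (List String))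
    (pf : PySem.Dict String (PySem.Dict String Int)) : String :=
  let phrases := pd.getD label []
  if phrases = [] then label ++ " present."
  else
    let freq := pf.getD label PySem.Dict.empty
    let chosen := if freq.items = [] then phrases.getD 0 ""  -- phrases[0]; in range since phrases ≠ []
                  else match pvBBest freq.items with
                       | some b => b.1
                       | none => ""  -- unreachable: freq.items ≠ []
    if chosen = "" then label ++ " present." else chosen

def generate_report_batch_alt (pred_labels_batch : List (List Int)) (phrase_dict : List (String × List String)) (phrase_freq : List (String × List (String × Int))) : List String :=
  let pd := PySem.Dict.ofList phrase_dict
  let pf := PySem.Dict.ofList (phrase_freq.map (fun p => (p.1, PySem.Dict.ofList p.2)))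
  let table := pyLABELS.map (fun l => pvBSent l pd pf)
  pred_labels_batch.map (fun row =>
    let sentences := ((PySem.List.enumerate row 0).filter (fun iv => iv.2 == 1)).map
      (fun iv => PySem.List.pyGetD table iv.1 "")  -- table[i]; in range under Pre_
    if sentences = [] then "No significant abnormalities detected."
    else PySem.Str.join " " sentences)

-- ===== PRECONDITION & SPEC =====
-- Pre_ excludes exactly the inputs where A raises IndexError: a predicted value 1 at an index ≥ 14
-- (beyond LABELS); B raises there too.
def Pre_generate_report_batch (pred_labels_batch : List (List Int)) (phrase_dict : List (String × List String)) (phrase_freq : List (String × List (String × Int))) : Prop :=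
  ∀ row ∈ pred_labels_batch, (1 : Int) ∉ row.drop 14
instance (pred_labels_batch : List (List Int)) (phrase_dict : List (String × List String)) (phrase_freq : List (String × List (String × Int))) : Decidable (Pre_generate_report_batch pred_labels_batch phrase_dict phrase_freq) := by unfold Pre_generate_report_batch; infer_instance

def pvWitness_generate_report_batch : List (List Int) × (List (String × List String)) × (List (String × List (String × Int))) :=
  ([[1, 0], [0, 0, 0]], [("No Finding", ["Lungs are clear."])], [("No Finding", [("Lungs are clear.", 2)])])

def Spec_generate_report_batch (pred_labels_batch : List (List Int)) (phrase_dict : List (String × List String)) (phrase_freq : List (String × List (String × Int))) (out : List String) : Prop := out = generate_report_batch_alt pred_labels_batch phrase_dict phrase_freq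
instance (pred_labels_batch : List (List Int)) (phrase_dict : List (String × List String)) (phrase_freq : List (String × List (String × Int))) (out : List String) : Decidable (Spec_generate_report_batch pred_labels_batch phrase_dict phrase_freq out) := by unfold Spec_generate_report_batch; infer_instance

-- ===== CLAIM (what is proved, stated in full; the proofs are below) =====
def Claim_equal_generate_report_batch : Prop := ∀ (pred_labels_batch : List (List Int)) (phrase_dict : List (String × List String)) (phrase_freq : List (String × List (String × Int))), Dom_generate_report_batch pred_labels_batch phrase_dict phrase_freq → Pre_generate_report_batch pred_labels_batch phrase_dict phrase_freq → Spec_generate_report_batch pred_labels_batch phrase_dict phrase_freq (generate_report_batch pred_labels_batch phrase_dict phrase_freq)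

-- ===== LEMMAS AND PROOFS =====

-- A's max? over the keys (keyed by lookup g) is B's running arg-max over the pairs, when g agrees with snd.
theorem pv_foldl_max_eq (f : Option String → String → Option String) (g : String → Int)
    (hf1 : ∀ k, f none k = some k)
    (hf2 : ∀ m k, f (some m) k = if g m < g k then some k else some m)
    (l : List (String × Int)) (acc : Option (String × Int))
    (h : ∀ p ∈ l, g p.1 = p.2) (hacc : ∀ b, acc = some b → g b.1 = b.2) :
    (l.map (·.1)).foldl f (acc.map (·.1)) =
      (l.foldl (fun best pc =>
        match best with
        | none => some pc
        | some b => if b.2 < pc.2 then some pc else some b) acc).map (·.1) := by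
  induction l generalizing acc with
  | nil => simp
  | cons p t ih =>
    have hp : g p.1 = p.2 := h p (by simp)
    have ht : ∀ q ∈ t, g q.1 = q.2 := fun q hq => h q (by simp [hq])
    cases acc with
    | none =>
      simp only [List.map_cons, List.foldl_cons, Option.map_none, hf1]
      exact ih (some p) ht (by intro b hb; cases hb; exact hp)
    | some b =>
      have hb : g b.1 = b.2 := hacc b rfl
      simp only [List.map_cons, List.foldl_cons, Option.map_some, hf2, hb, hp]
      by_cases hlt : b.2 < p.2
      · simp only [if_pos hlt]
        exact ih (some p) ht (by intro c hc; cases hc; exact hp)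
      · simp only [if_neg hlt]
        exact ih (some b) ht (by intro c hc; cases hc; exact hb)

theorem pv_foldl_best_some (t : List (String × Int)) : ∀ acc : String × Int,
    ∃ b, t.foldl (fun best pc =>
        match best with
        | none => some pc
        | some b => if b.2 < pc.2 then some pc else some b) (some acc) = some b := by
  induction t with
  | nil => exact fun acc => ⟨acc, rfl⟩
  | cons q t ih =>
    intro acc
    simp only [List.foldl_cons]
    by_cases hlt : acc.2 < q.2
    · simpa [hlt] using ih q
    · simpa [hlt] using ih acc

theorem pvBBest_isSome (l : List (String × Int)) (h : l ≠ []) : ∃ b, pvBBest l = some b := by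
  unfold pvBBest
  cases l with
  | nil => exact absurd rfl h
  | cons p t =>
    simp only [List.foldl_cons]
    exact pv_foldl_best_some t p

-- every item of a dict built by update comes from the base dict or the pair list
theorem pv_mem_items_update {κ ν : Type} [BEq κ] [LawfulBEq κ]
    (l : List (κ × ν)) (d : PySem.Dict κ ν) (p : κ × ν)
    (hp : p ∈ (d.update l).items) : p ∈ d.items ∨ p ∈ l := by
  induction l generalizing d with
  | nil => exact Or.inl hp
  | cons x t ih =>
    have : p ∈ ((d.insert x.1 x.2).update t).items := by
      simpa [PySem.Dict.update] using hp
    rcases ih (d.insert x.1 x.2) this with h | h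
    · rw [PySem.Dict.mem_items_insert] at h
      rcases h with h | ⟨h, _⟩
      · exact Or.inr (by simp [h])
      · exact Or.inl h
    · exact Or.inr (by simp [h])

-- any value looked up in the converted phrase_freq dict has Nodup keys
theorem pv_freq_nodup (phrase_freq : List (String × List (String × Int))) (label : String) :
    ((PySem.Dict.ofList (phrase_freq.map (fun p => (p.1, PySem.Dict.ofList p.2)))).getD
      label PySem.Dict.empty).keys.Nodup := by
  rw [PySem.Dict.getD_eq_get?_getD]
  cases hg : (PySem.Dict.ofList (phrase_freq.map (fun p => (p.1, PySem.Dict.ofList p.2)))).get? label with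
  | none => simp [PySem.Dict.empty, PySem.Dict.keys]
  | some f =>
    have hmem := PySem.Dict.mem_items_of_get?_eq_some _ hg
    have := pv_mem_items_update (phrase_freq.map (fun p => (p.1, PySem.Dict.ofList p.2)))
      PySem.Dict.empty (label, f) (by simpa [PySem.Dict.ofList] using hmem)
    rcases this with h | h
    · simp [PySem.Dict.empty] at h
    · rcases List.mem_map.mp h with ⟨q, _, hq⟩
      have : f = PySem.Dict.ofList q.2 := congrArg Prod.snd hq.symm
      simpa [this] using PySem.Dict.nodup_keys_ofList q.2

-- per label: A's inline sentence equals B's precomputed sentence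
theorem pv_sent_eq (label : String) (pd : PySem.Dict String (List String))
    (pf : PySem.Dict String (PySem.Dict String Int))
    (hf : ∀ lbl, (pf.getD lbl PySem.Dict.empty).keys.Nodup) :
    pvSentA label pd pf = pvBSent label pd pf := by
  unfold pvSentA pvBSent pvMostFrequentPhrase
  by_cases hph : pd.getD label [] = []
  · simp [hph]
  · simp only [hph, if_false]
    by_cases hfr : (pf.getD label PySem.Dict.empty).items = []
    · simp [hfr]
    · simp only [hfr, if_false]
      set freq := pf.getD label PySem.Dict.empty with hfreq
      have hkey : ∀ p ∈ freq.items, freq.getD p.1 0 = p.2 := by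
        intro p hp
        exact PySem.Dict.getD_of_mem_items _ (by rwa [← Prod.mk.eta (p := p)] at hp) (hf label) 0
      have hmax : PySem.List.max? freq.keys (fun k => freq.getD k 0) =
          (pvBBest freq.items).map (·.1) := by
        unfold PySem.List.max? pvBBest PySem.Dict.keys
        exact pv_foldl_max_eq _ (fun k => freq.getD k 0) (fun k => rfl) (fun m k => rfl)
          freq.items none hkey (by intro b hb; cases hb)
      obtain ⟨b, hb⟩ := pvBBest_isSome freq.items hfr
      rw [hmax, hb]
      simp

-- under Pre_, each row's sentence list agrees between the two loop shapes
theorem pv_row_eq (row : List Int) (pd : PySem.Dict String (List String))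
    (pf : PySem.Dict String (PySem.Dict String Int))
    (hf : ∀ lbl, (pf.getD lbl PySem.Dict.empty).keys.Nodup)
    (hrow : (1 : Int) ∉ row.drop 14) :
    (PySem.List.enumerate row 0).foldl (fun sents iv =>
      if iv.2 = 1 then sents ++ [pvSentA (PySem.List.pyGetD pyLABELS iv.1 "") pd pf] else sents) [] =
    ((PySem.List.enumerate row 0).filter (fun iv => iv.2 == 1)).map
      (fun iv => PySem.List.pyGetD (pyLABELS.map (fun l => pvBSent l pd pf)) iv.1 "") := by
  rw [PySem.List.foldl_append_ite (p := fun iv : Int × Int => iv.2 = 1)]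
  simp only [List.nil_append]
  have hfilter : (PySem.List.enumerate row 0).filter (fun iv => decide (iv.2 = 1)) =
      (PySem.List.enumerate row 0).filter (fun iv => iv.2 == 1) := by
    apply List.filter_congr
    intro iv _
    by_cases h1 : iv.2 = 1 <;> simp [h1]
  rw [hfilter]
  apply List.map_congr_left
  intro iv hiv
  have hmem := List.mem_of_mem_filter hiv
  have hone : iv.2 = 1 := by simpa using List.of_mem_filter hiv
  rcases (PySem.List.mem_enumerate_iff _ _ _).mp hmem with ⟨k, hk, hivk⟩
  have hk14 : k < 14 := by
    by_contra hge
    push_neg at hge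
    have : (1 : Int) ∈ row.drop 14 := by
      have h14 : 14 + (k - 14) < row.length := by omega
      have : (row.drop 14)[k - 14]'(by rw [List.length_drop]; omega) = row[k]'hk := by
        rw [List.getElem_drop]
        congr 1
        omega
      rw [← hone, hivk]
      simp only
      rw [← this]
      exact List.getElem_mem _
    exact hrow this
  have hiv1 : iv.1 = ((k : Nat) : Int) := by rw [hivk]; simp
  rw [hiv1, PySem.List.pyGetD_natCast, PySem.List.pyGetD_natCast]
  have hlab : pyLABELS.length = 14 := by decide
  rw [List.getD_eq_getElem _ _ (by simp only [hlab]; omega),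
      List.getD_eq_getElem _ _ (by simp only [List.length_map, hlab]; omega)]
  rw [List.getElem_map]
  exact pv_sent_eq _ pd pf hf

-- the outer loop: A's foldl over the batch is acc ++ B's map over the batch
theorem pv_batch_eq (batch : List (List Int)) (pd : PySem.Dict String (List String))
    (pf : PySem.Dict String (PySem.Dict String Int))
    (hf : ∀ lbl, (pf.getD lbl PySem.Dict.empty).keys.Nodup)
    (hpre : ∀ row ∈ batch, (1 : Int) ∉ row.drop 14) (acc : List String) :
    batch.foldl (fun reports pred_labels =>
      let sentences := (PySem.List.enumerate pred_labels 0).foldl (fun sents iv =>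
        if iv.2 = 1 then sents ++ [pvSentA (PySem.List.pyGetD pyLABELS iv.1 "") pd pf] else sents) []
      if sentences = [] then reports ++ ["No significant abnormalities detected."]
      else reports ++ [PySem.Str.join " " sentences]) acc =
    acc ++ batch.map (fun row =>
      let sentences := ((PySem.List.enumerate row 0).filter (fun iv => iv.2 == 1)).map
        (fun iv => PySem.List.pyGetD (pyLABELS.map (fun l => pvBSent l pd pf)) iv.1 "")
      if sentences = [] then "No significant abnormalities detected."
      else PySem.Str.join " " sentences) := by
  induction batch generalizing acc with
  | nil => simp
  | cons row t ih =>
    have hrow := pv_row_eq row pd pf hf (hpre row (by simp))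
    have ht : ∀ r ∈ t, (1 : Int) ∉ r.drop 14 := fun r hr => hpre r (by simp [hr])
    simp only [List.foldl_cons, List.map_cons]
    rw [hrow]
    by_cases hs : ((PySem.List.enumerate row 0).filter (fun iv => iv.2 == 1)).map
        (fun iv => PySem.List.pyGetD (pyLABELS.map (fun l => pvBSent l pd pf)) iv.1 "") = []
    · simp only [hs]
      rw [ih ht]
      simp
    · simp only [if_neg hs]
      rw [ih ht]
      simp

-- ===== VERDICT (by name: the statement is the Claim_ definition above) =====
theorem generate_report_batch_spec : Claim_equal_generate_report_batch := by
  intro pred_labels_batch phrase_dict phrase_freq _ hpre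
  unfold Spec_generate_report_batch generate_report_batch generate_report_batch_alt
  have hf := pv_freq_nodup phrase_freq
  rw [pv_batch_eq pred_labels_batch _ _ hf hpre []]
  simp
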